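-- pv_equiv track=rewrite | github.com/ska-telescope/ska-sdp-benchmark-monitor | benchmon/hardware/advanced/pingpongroundtrip.py | arrange_pairs_min_overlap
-- ===== SOURCE A (Python) =====
-- def arrange_pairs_min_overlap(pairs):
--     """
--         Take a list of pairs and order it in a way that creates as few overlap as possible.
--         This enables most efficient usage of the nodes
--     """
--     result = []
--     while pairs:
--         # Create a new group of non-overlapping pairs
--         non_overlapping = []
--         used_nodes = set()
--
--         # Loop over the pairs and add non-overlapping pairs to the group
--         remaining_pairs = []
--         for pair in pairs:
--             if not (pair[0] in used_nodes or pair[1] in used_nodes):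
--                 non_overlapping.append(pair)
--                 used_nodes.update(pair)
--             else:
--                 remaining_pairs.append(pair)  # Leave for next round
--
--         # Add this group to the result
--         result.extend(non_overlapping)
--
--         # Update pairs with remaining pairs for the next iteration
--         pairs = remaining_pairs
--
--     return result
-- ===== SOURCE B (Python) =====
-- def arrange_pairs_min_overlap(pairs):
--     # Single forward pass: assign each pair to the first round whose used-set
--     # contains neither endpoint; concatenate rounds at the end.
--     rounds = []  # list of [used_set, group]
--     for pair in pairs:
--         for used, group in rounds:
--             if pair[0] not in used and pair[1] not in used:
--                 used.update(pair)
--                 group.append(pair)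
--                 break
--         else:
--             rounds.append(({*pair}, [pair]))
--     return [p for _, g in rounds for p in g]
-- ===== Notes on version B (the rewrite author's own statement) =====
-- stated objective: alternative
-- what changed: Replaces the repeated peeling loop (rescan the whole remaining list once per round, rebuilding a remaining list each time) by one forward pass that assigns each pair to the first existing round whose used-set is disjoint from its endpoints, creating a new round when none fits.
import Mathlib
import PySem

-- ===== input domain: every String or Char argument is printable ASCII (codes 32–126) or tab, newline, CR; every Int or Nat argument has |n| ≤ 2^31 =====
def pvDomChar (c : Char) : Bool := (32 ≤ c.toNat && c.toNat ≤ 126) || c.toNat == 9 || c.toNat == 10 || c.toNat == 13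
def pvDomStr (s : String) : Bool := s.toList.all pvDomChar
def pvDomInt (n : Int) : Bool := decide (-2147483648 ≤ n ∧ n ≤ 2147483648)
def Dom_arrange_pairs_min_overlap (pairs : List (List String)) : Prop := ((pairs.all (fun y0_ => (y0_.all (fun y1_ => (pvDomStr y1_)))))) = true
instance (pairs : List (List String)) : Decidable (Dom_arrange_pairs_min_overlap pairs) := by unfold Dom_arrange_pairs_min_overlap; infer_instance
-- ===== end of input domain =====

-- B replaces A's repeated peeling of non-overlapping rounds by ONE forward pass that puts
-- each pair into the first round whose used-set avoids both endpoints (objective: alternative).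

-- shared helper: 'pair[0] in used or pair[1] in used' (short-circuit; a pair with fewer than
-- two elements makes Python raise IndexError here — those inputs are excluded by Pre_, the
-- port returns false there)
def pvConf (u : PySem.Set String) (pair : List String) : Bool :=
  match pair with
  | a :: b :: _ => PySem.Set.contains u a || PySem.Set.contains u b
  | [a] => PySem.Set.contains u a  -- 'pair[0] in used' short-circuits; 'pair[1]' would raise
  | [] => false

-- ===== PORT A =====
-- one round of A's while-loop body: the 'for pair in pairs' pass building non_overlapping
-- and remaining_pairs (returned front-to-back, the same order the Python appends produce)
def pvPass (u : PySem.Set String) : List (List String) → List (List String) × List (List String)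
  | [] => ([], [])
  | p :: ps =>
    if pvConf u p then
      let r := pvPass u ps
      (r.1, p :: r.2)
    else
      let r := pvPass (PySem.Set.update u p) ps
      (p :: r.1, r.2)

theorem pvPass_rem_len_le (u : PySem.Set String) (ps : List (List String)) :
    (pvPass u ps).2.length ≤ ps.length := by
  induction ps generalizing u with
  | nil => simp [pvPass]
  | cons p ps ih =>
    simp only [pvPass]
    split
    · simpa using Nat.succ_le_succ (ih u)
    · exact Nat.le_succ_of_le (ih _)

theorem pvConf_empty (p : List String) : pvConf PySem.Set.empty p = false := by
  unfold pvConf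
  split <;> rfl

-- A's while-loop: peel one round, append it, recurse on the remaining pairs
def arrange_pairs_min_overlap (pairs : List (List String)) : List (List String) :=
  match pairs with
  | [] => []
  | p :: ps =>
    let pr := pvPass PySem.Set.empty (p :: ps)
    pr.1 ++ arrange_pairs_min_overlap pr.2
termination_by pairs.length
decreasing_by
  simp only [pvPass, pvConf_empty, if_neg Bool.false_ne_true]
  exact Nat.lt_succ_of_le (pvPass_rem_len_le _ ps)

-- ===== PORT B =====
-- B's inner 'for used, group in rounds' scan with break / else: put the pair into the first
-- non-conflicting round, or open a new round {*pair}
def pvInsert (pair : List String) : List (PySem.Set String × List (List String)) →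
    List (PySem.Set String × List (List String))
  | [] => [(PySem.Set.ofList pair, [pair])]
  | (u, g) :: rest =>
    if pvConf u pair then (u, g) :: pvInsert pair rest
    else (PySem.Set.update u pair, g ++ [pair]) :: rest

-- B's outer pass over pairs, then the flattening comprehension
def arrange_pairs_min_overlap_alt (pairs : List (List String)) : List (List String) :=
  (pairs.foldl (fun rs p => pvInsert p rs) []).flatMap Prod.snd

-- ===== PRECONDITION & SPEC =====
-- Pre_ excludes exactly the inputs on which Python A raises IndexError: a pair with fewer
-- than two elements is eventually indexed by pair[1] (or pair[0]) with used_nodes empty.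
def Pre_arrange_pairs_min_overlap (pairs : List (List String)) : Prop :=
  ∀ p ∈ pairs, 2 ≤ p.length
instance (pairs : List (List String)) : Decidable (Pre_arrange_pairs_min_overlap pairs) := by
  unfold Pre_arrange_pairs_min_overlap; infer_instance

def pvWitness_arrange_pairs_min_overlap : List (List String) :=
  [["a", "b"], ["b", "c"], ["c", "d"], ["a", "d"]]

def Spec_arrange_pairs_min_overlap (pairs : List (List String)) (out : List (List String)) : Prop := out = arrange_pairs_min_overlap_alt pairs
instance (pairs : List (List String)) (out : List (List String)) : Decidable (Spec_arrange_pairs_min_overlap pairs out) := by unfold Spec_arrange_pairs_min_overlap; infer_instance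

-- ===== CLAIM (what is proved, stated in full; the proofs are below) =====
def Claim_equal_arrange_pairs_min_overlap : Prop := ∀ (pairs : List (List String)), Dom_arrange_pairs_min_overlap pairs → Pre_arrange_pairs_min_overlap pairs → Spec_arrange_pairs_min_overlap pairs (arrange_pairs_min_overlap pairs)

-- ===== LEMMAS AND PROOFS =====

-- the used-set a round has accumulated after absorbing the pairs of 'sel'
def pvUpdAll (u : PySem.Set String) (sel : List (List String)) : PySem.Set String :=
  sel.foldl PySem.Set.update u

-- Key invariant: running B's pass over 'ps' starting from a rounds list headed by (u, g)
-- lets the head round absorb exactly A's pass selection from 'ps' against u, and sends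
-- exactly A's remaining pairs on to the later rounds.
theorem pvInsert_foldl_cons (ps : List (List String)) (u : PySem.Set String)
    (g : List (List String)) (rest : List (PySem.Set String × List (List String))) :
    ps.foldl (fun rs p => pvInsert p rs) ((u, g) :: rest)
      = (pvUpdAll u (pvPass u ps).1, g ++ (pvPass u ps).1)
        :: (pvPass u ps).2.foldl (fun rs p => pvInsert p rs) rest := by
  induction ps generalizing u g rest with
  | nil => simp [pvPass, pvUpdAll]
  | cons p ps ih =>
    by_cases h : pvConf u p
    · simp only [List.foldl_cons, pvInsert, h, if_true, pvPass]
      rw [ih u g (pvInsert p rest)]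
    · simp only [List.foldl_cons, pvInsert, h, if_neg Bool.false_ne_true, pvPass]
      rw [ih (PySem.Set.update u p) (g ++ [p]) rest]
      simp [pvUpdAll]

theorem arrange_eq_alt (pairs : List (List String)) :
    arrange_pairs_min_overlap pairs = arrange_pairs_min_overlap_alt pairs := by
  induction pairs using arrange_pairs_min_overlap.induct with
  | case1 => rw [arrange_pairs_min_overlap]; rfl
  | case2 p ps pr ih =>
    rw [arrange_pairs_min_overlap]
    rw [ih]
    unfold arrange_pairs_min_overlap_alt
    simp only [List.foldl_cons, pvInsert]
    have hofl : PySem.Set.ofList p = PySem.Set.update PySem.Set.empty p := rfl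
    rw [hofl, pvInsert_foldl_cons ps (PySem.Set.update PySem.Set.empty p) [p] []]
    simp only [pvPass, pvConf_empty, if_neg Bool.false_ne_true, List.flatMap_cons]
    simp
    have h2 : pr.2 = (pvPass (PySem.Set.update PySem.Set.empty p) ps).2 := by
      show (pvPass PySem.Set.empty (p :: ps)).2 = _
      rw [pvPass, pvConf_empty]
      simp
    rw [h2]
    rfl

-- ===== VERDICT (by name: the statement is the Claim_ definition above) =====
theorem arrange_pairs_min_overlap_spec : Claim_equal_arrange_pairs_min_overlap := by
  intro pairs _ _
  exact arrange_eq_alt pairs
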